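-- pv_equiv track=rewrite | github.com/JMespoir/2022_02_Python | Chapter_3/Collatz_prof.py | solve
-- ===== SOURCE A (Python) =====
-- def solve(A,B):
--     a = collatz(A)[::-1]
--     b = collatz(B)[::-1]
--     minlen = min(len(a),len(b))
--     i = 0
--     while True:
--         if i == minlen or a[i] != b[i]:
--             break
--         i += 1
--     return len(a) - i, len(b) - i, a[i-1]
--
-- def collatz(N):
--     if N == 1:
--         return [1]
--     elif N % 2 == 0 :
--         return [N] + collatz(N//2)
--     else:
--         return[N] + collatz(3*N +1)
-- ===== SOURCE B (Python) =====
-- def collatz(N):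
--     if N == 1:
--         return [1]
--     elif N % 2 == 0 :
--         return [N] + collatz(N//2)
--     else:
--         return[N] + collatz(3*N +1)
--
-- def solve(A, B):
--     sa = collatz(A)
--     sb = collatz(B)
--     seen = set(sa)
--     for m in sb:
--         if m in seen:
--             return sa.index(m), sb.index(m), m
-- ===== Notes on version B (the rewrite author's own statement) =====
-- stated objective: alternative
-- what changed: A reverses both Collatz sequences and walks them in parallel by index to find the first mismatch; B never reverses: it builds a set of A's sequence, scans B's sequence forward for the first shared value (the merge point), and reads the two answers off with list.index.
import Mathlib
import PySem

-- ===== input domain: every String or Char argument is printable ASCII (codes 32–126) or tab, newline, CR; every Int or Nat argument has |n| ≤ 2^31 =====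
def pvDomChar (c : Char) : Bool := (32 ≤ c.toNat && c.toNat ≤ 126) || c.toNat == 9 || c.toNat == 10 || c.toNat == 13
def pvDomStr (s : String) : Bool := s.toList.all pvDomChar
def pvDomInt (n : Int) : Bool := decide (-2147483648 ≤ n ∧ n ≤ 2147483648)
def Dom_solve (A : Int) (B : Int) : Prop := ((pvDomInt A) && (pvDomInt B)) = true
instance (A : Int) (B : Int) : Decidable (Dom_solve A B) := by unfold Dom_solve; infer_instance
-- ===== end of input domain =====

-- B replaces A's double-reversal + parallel index walk by a set of A's sequence and a forward
-- scan of B's sequence for the first shared value (objective: alternative). Proof is about the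
-- return value; neither program mutates its arguments.

-- ===== PORT A =====
-- shared helper: Python's recursive collatz, with fuel (Python recurses without bound;
-- fuel 20000 exceeds any chain length reached from an input admitted by Pre_solve)
def collatzF : Nat → Int → List Int
  | 0, _ => []
  | fuel+1, N =>
    if N = 1 then [1]
    else if PySem.Int.mod N 2 = 0 then N :: collatzF fuel (PySem.Int.floordiv N 2)
    else N :: collatzF fuel (3*N + 1)

def collatzPy (N : Int) : List Int := collatzF 20000 N

-- A's 'while True' index loop; fuel = minlen+1 suffices since the loop breaks at i = minlen
def mismLoop (a b : List Int) (minlen : Nat) : Nat → Nat → Nat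
  | 0, i => i
  | fuel+1, i =>
    if i = minlen ∨ PySem.List.pyGet? a (i : Int) ≠ PySem.List.pyGet? b (i : Int) then i
    else mismLoop a b minlen fuel (i+1)

def solve (A : Int) (B : Int) : Int × Int × Int :=
  let a := (collatzPy A).reverse          -- collatz(A)[::-1]
  let b := (collatzPy B).reverse
  let minlen := min a.length b.length
  let i := mismLoop a b minlen (minlen + 1) 0
  (((a.length : Int) - i), ((b.length : Int) - i),
    (PySem.List.pyGet? a ((i : Int) - 1)).getD 0)   -- a[i-1]; i ≥ 1 under Pre_, so never none

-- ===== PORT B =====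
def solve_alt (A : Int) (B : Int) : Int × Int × Int :=
  let sa := collatzPy A
  let sb := collatzPy B
  let seen : PySem.Set Int := PySem.Set.ofList sa
  match sb.find? (fun m => PySem.Set.contains seen m) with
  | some m => (((PySem.List.index? sa m).getD 0 : Int), ((PySem.List.index? sb m).getD 0 : Int), m)
  | none => (0, 0, 0)                     -- unreachable under Pre_ (Python falls off: returns None)

-- ===== PRECONDITION & SPEC =====
-- one Collatz step, used only by Pre_ and the proofs
def cstep (n : Int) : Int := if PySem.Int.mod n 2 = 0 then PySem.Int.floordiv n 2 else 3*n + 1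

-- does n reach 1 within f steps?
def reaches1 : Nat → Int → Bool
  | f, n => if n = 1 then true else match f with
    | 0 => false
    | f+1 => reaches1 f (cstep n)

-- Pre_ admits exactly the inputs whose Collatz chains reach 1 (there is no closed form for
-- Collatz termination; this step-iteration bound of 19999 exceeds every chain length in Dom,
-- so inside Dom it excludes only inputs on which Python's unbounded recursion never returns).
def Pre_solve (A : Int) (B : Int) : Prop := reaches1 19999 A = true ∧ reaches1 19999 B = true
instance (A : Int) (B : Int) : Decidable (Pre_solve A B) := by unfold Pre_solve; infer_instance
def pvWitness_solve : Int × Int := (6, 22)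

def Spec_solve (A : Int) (B : Int) (out : Int × Int × Int) : Prop := out = solve_alt A B
instance (A : Int) (B : Int) (out : Int × Int × Int) : Decidable (Spec_solve A B out) := by unfold Spec_solve; infer_instance

-- ===== CLAIM (what is proved, stated in full; the proofs are below) =====
def Claim_equal_solve : Prop := ∀ (A : Int) (B : Int), Dom_solve A B → Pre_solve A B → Spec_solve A B (solve A B)

-- ===== LEMMAS AND PROOFS =====

-- 'l is the Collatz chain from n, stopping at the first 1'
inductive CChain : Int → List Int → Prop
  | one : CChain 1 [1]
  | cons {n : Int} {l : List Int} : n ≠ 1 → CChain (cstep n) l → CChain n (n :: l)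

theorem cchain_unique {n : Int} {l₁ l₂ : List Int} (h₁ : CChain n l₁) (h₂ : CChain n l₂) : l₁ = l₂ := by
  induction h₁ generalizing l₂ with
  | one => cases h₂ with
    | one => rfl
    | cons hne _ => exact absurd rfl hne
  | cons hne hc ih => cases h₂ with
    | one => exact absurd rfl hne
    | cons _ hc₂ => rw [ih hc₂]

theorem cchain_suffix {n : Int} {l : List Int} (h : CChain n l) :
    ∀ (v : Int) (xs ys : List Int), l = xs ++ v :: ys → CChain v (v :: ys) := by
  induction h with
  | one =>
    intro v xs ys he
    cases xs with
    | nil => simp at he; obtain ⟨h1, h2⟩ := he; subst h1; subst h2; exact CChain.one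
    | cons x xs => simp at he
  | @cons n l hne hc ih =>
    intro v xs ys he
    cases xs with
    | nil =>
      simp at he; obtain ⟨h1, h2⟩ := he; subst h1; subst h2
      exact CChain.cons hne hc
    | cons x xs =>
      simp at he
      exact ih v xs ys he.2

theorem cchain_nodup {n : Int} {l : List Int} (h : CChain n l) : l.Nodup := by
  induction h with
  | one => simp
  | @cons n l hne hc ih =>
    refine List.nodup_cons.mpr ⟨fun hmem => ?_, ih⟩
    obtain ⟨xs, ys, he⟩ := List.append_of_mem hmem
    have h1 : CChain n (n :: ys) := cchain_suffix hc n xs ys he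
    have h2 : CChain n (n :: l) := CChain.cons hne hc
    have heq := cchain_unique h1 h2
    simp only [List.cons.injEq, true_and] at heq
    subst heq
    have hlen := congrArg List.length he
    simp at hlen
    omega

theorem cchain_one_mem {n : Int} {l : List Int} (h : CChain n l) : (1 : Int) ∈ l := by
  induction h with
  | one => simp
  | cons _ _ ih => simpa using Or.inr ih

theorem reaches1_chain {f : Nat} {n : Int} (h : reaches1 f n = true) :
    ∃ l, CChain n l ∧ l.length ≤ f + 1 := by
  induction f generalizing n with
  | zero =>
    rw [reaches1] at h
    by_cases h1 : n = 1
    · exact ⟨[1], h1 ▸ CChain.one, by simp⟩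
    · simp [h1] at h
  | succ f ih =>
    rw [reaches1] at h
    by_cases h1 : n = 1
    · exact ⟨[1], h1 ▸ CChain.one, by simp⟩
    · simp only [h1, if_false] at h
      obtain ⟨l, hc, hl⟩ := ih h
      exact ⟨n :: l, CChain.cons h1 hc, by simpa using Nat.succ_le_succ hl⟩

theorem collatzF_eq_of_chain {n : Int} {l : List Int} (h : CChain n l) :
    ∀ g, l.length ≤ g → collatzF g n = l := by
  induction h with
  | one =>
    intro g hg
    match g, hg with
    | g+1, _ => simp [collatzF]
  | @cons n l hne hc ih =>
    intro g hg
    match g, hg with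
    | g+1, hg =>
      have := ih g (by simpa using Nat.le_of_succ_le_succ hg)
      simp only [collatzF, hne, if_false]
      unfold cstep at this
      by_cases he : PySem.Int.mod n 2 = 0
      · rw [if_pos he] at this ⊢; rw [this]
      · rw [if_neg he] at this ⊢; rw [this]

theorem mismLoop_prefix (p ra rb : List Int)
    (hbr : p.length = min (p ++ ra).length (p ++ rb).length ∨ ra.head? ≠ rb.head?) :
    ∀ (fuel j : Nat), j ≤ p.length → p.length - j < fuel →
      mismLoop (p ++ ra) (p ++ rb) (min (p ++ ra).length (p ++ rb).length) fuel j = p.length := by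
  intro fuel
  induction fuel with
  | zero => intro j _ h2; omega
  | succ fuel ih =>
    intro j hj hfuel
    by_cases hend : j = p.length
    · subst hend
      rw [mismLoop]
      rcases hbr with hbr | hbr
      · rw [if_pos (Or.inl hbr)]
      · rw [if_pos]
        right
        rw [PySem.List.pyGet?_natCast, PySem.List.pyGet?_natCast,
            List.getElem?_append_right (le_refl _), List.getElem?_append_right (le_refl _)]
        simpa [← List.head?_eq_getElem?] using hbr
    · have hlt : j < p.length := lt_of_le_of_ne hj hend
      rw [mismLoop]
      have hcond : ¬(j = min (p ++ ra).length (p ++ rb).length ∨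
          PySem.List.pyGet? (p ++ ra) (j : Int) ≠ PySem.List.pyGet? (p ++ rb) (j : Int)) := by
        rintro (h | h)
        · simp [List.length_append] at h; omega
        · exact h (by rw [PySem.List.pyGet?_natCast, PySem.List.pyGet?_natCast,
              List.getElem?_append_left hlt, List.getElem?_append_left hlt])
      rw [if_neg hcond]
      exact ih (j+1) (by omega) (by omega)

theorem solve_eq_of_split (A B : Int) (xs ys t : List Int) (m : Int)
    (hA : collatzPy A = xs ++ m :: t) (hB : collatzPy B = ys ++ m :: t)
    (hbr : xs = [] ∨ ys = [] ∨ xs.getLast? ≠ ys.getLast?) :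
    solve A B = ((xs.length : Int), (ys.length : Int), m) := by
  have hrevA : (collatzPy A).reverse = (t.reverse ++ [m]) ++ xs.reverse := by simp [hA]
  have hrevB : (collatzPy B).reverse = (t.reverse ++ [m]) ++ ys.reverse := by simp [hB]
  have hple : (t.reverse ++ [m]).length ≤
      min ((t.reverse ++ [m]) ++ xs.reverse).length ((t.reverse ++ [m]) ++ ys.reverse).length := by
    simp only [List.length_append, List.length_reverse, List.length_cons, List.length_nil]
    omega
  have hbr' : (t.reverse ++ [m]).length =
        min ((t.reverse ++ [m]) ++ xs.reverse).length ((t.reverse ++ [m]) ++ ys.reverse).length ∨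
      xs.reverse.head? ≠ ys.reverse.head? := by
    rcases hbr with h | h | h
    · left; subst h
      simp only [List.length_append, List.length_reverse, List.length_cons, List.length_nil]
      omega
    · left; subst h
      simp only [List.length_append, List.length_reverse, List.length_cons, List.length_nil]
      omega
    · right; simpa [List.head?_reverse] using h
  have hmism := mismLoop_prefix (t.reverse ++ [m]) xs.reverse ys.reverse hbr'
    (min ((t.reverse ++ [m]) ++ xs.reverse).length ((t.reverse ++ [m]) ++ ys.reverse).length + 1)
    0 (Nat.zero_le _) (by omega)
  show (let a := (collatzPy A).reverse; let b := (collatzPy B).reverse;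
        let minlen := min a.length b.length;
        let i := mismLoop a b minlen (minlen + 1) 0;
        (((a.length : Int) - i), ((b.length : Int) - i),
          (PySem.List.pyGet? a ((i : Int) - 1)).getD 0)) = _
  simp only [hrevA, hrevB]
  rw [hmism]
  have hget : PySem.List.pyGet? ((t.reverse ++ [m]) ++ xs.reverse)
      (((t.reverse ++ [m]).length : Int) - 1) = some m := by
    have hcast : (((t.reverse ++ [m]).length : Int) - 1) = ((t.reverse.length : Nat) : Int) := by
      simp only [List.length_append, List.length_reverse, List.length_cons, List.length_nil]
      push_cast; ring
    rw [hcast, PySem.List.pyGet?_natCast, List.append_assoc, List.singleton_append,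
        List.getElem?_append_right (le_refl _)]
    simp
  rw [hget]
  simp

theorem alt_eq_of_split (A B : Int) (xs ys t : List Int) (m : Int)
    (hA : collatzPy A = xs ++ m :: t) (hB : collatzPy B = ys ++ m :: t)
    (hmxs : m ∉ xs) (hmys : m ∉ ys) (hys : ∀ y ∈ ys, y ∉ xs ++ m :: t) :
    solve_alt A B = ((xs.length : Int), (ys.length : Int), m) := by
  have hfind : (collatzPy B).find?
      (fun x => PySem.Set.contains (PySem.Set.ofList (collatzPy A)) x) = some m := by
    rw [hB, hA, List.find?_append]
    have h1 : ys.find? (fun x => PySem.Set.contains (PySem.Set.ofList (xs ++ m :: t)) x) = none := by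
      rw [List.find?_eq_none]
      intro y hy
      simpa [PySem.Set.contains_iff, PySem.Set.mem_ofList] using hys y hy
    have h2 : (m :: t).find? (fun x => PySem.Set.contains (PySem.Set.ofList (xs ++ m :: t)) x)
        = some m := by
      rw [List.find?_cons_of_pos]
      simp [PySem.Set.mem_ofList]
    rw [h1, h2]
    rfl
  have hidxA : PySem.List.index? (collatzPy A) m = some xs.length := by
    rw [hA, PySem.List.index?_eq_some_iff]
    exact ⟨xs, t, rfl, rfl, hmxs⟩
  have hidxB : PySem.List.index? (collatzPy B) m = some ys.length := by
    rw [hB, PySem.List.index?_eq_some_iff]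
    exact ⟨ys, t, rfl, rfl, hmys⟩
  show (let sa := collatzPy A; let sb := collatzPy B;
        let seen : PySem.Set Int := PySem.Set.ofList sa;
        match sb.find? (fun m => PySem.Set.contains seen m) with
        | some m => (((PySem.List.index? sa m).getD 0 : Int),
            ((PySem.List.index? sb m).getD 0 : Int), m)
        | none => ((0 : Int), (0 : Int), (0 : Int))) = _
  simp only [hfind, hidxA, hidxB]
  rfl

theorem first_common (sa : List Int) :
    ∀ (sb : List Int), (∃ x ∈ sb, x ∈ sa) →
      ∃ ys m zs, sb = ys ++ m :: zs ∧ m ∈ sa ∧ ∀ y ∈ ys, y ∉ sa := by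
  intro sb
  induction sb with
  | nil => simp
  | cons x sb ih =>
    intro h
    by_cases hx : x ∈ sa
    · exact ⟨[], x, sb, rfl, hx, by simp⟩
    · have h' : ∃ y ∈ sb, y ∈ sa := by
        obtain ⟨y, hy, hysa⟩ := h
        rcases List.mem_cons.mp hy with rfl | hy'
        · exact absurd hysa hx
        · exact ⟨y, hy', hysa⟩
      obtain ⟨ys, m, zs, he, hm, hy⟩ := ih h'
      refine ⟨x :: ys, m, zs, by simp [he], hm, ?_⟩
      intro y hy'
      rcases List.mem_cons.mp hy' with rfl | hy''
      · exact hx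
      · exact hy y hy''

-- ===== VERDICT (by name: the statement is the Claim_ definition above) =====
theorem solve_spec : Claim_equal_solve := by
  intro A B _hdom hpre
  unfold Spec_solve
  obtain ⟨la, hca, hla⟩ := reaches1_chain hpre.1
  obtain ⟨lb, hcb, hlb⟩ := reaches1_chain hpre.2
  have hsa : collatzPy A = la := collatzF_eq_of_chain hca 20000 (by omega)
  have hsb : collatzPy B = lb := collatzF_eq_of_chain hcb 20000 (by omega)
  have hcommon : ∃ x ∈ lb, x ∈ la := ⟨1, cchain_one_mem hcb, cchain_one_mem hca⟩
  obtain ⟨ys, m, zs, heb, hm, hys⟩ := first_common la lb hcommon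
  obtain ⟨xs, t, hea⟩ := List.append_of_mem hm
  have hna : la.Nodup := cchain_nodup hca
  have hmxs : m ∉ xs := by
    rw [hea, List.nodup_append] at hna
    exact fun hx => hna.2.2 m hx m (by simp) rfl
  have hzs : zs = t := by
    have h1 : CChain m (m :: t) := cchain_suffix hca m xs t hea
    have h2 : CChain m (m :: zs) := cchain_suffix hcb m ys zs heb
    simpa using (cchain_unique h2 h1)
  subst hzs
  have hmys : m ∉ ys := fun hx => hys m hx hm
  have hbr : xs = [] ∨ ys = [] ∨ xs.getLast? ≠ ys.getLast? := by
    by_cases hxs : xs = []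
    · exact Or.inl hxs
    by_cases hys' : ys = []
    · exact Or.inr (Or.inl hys')
    refine Or.inr (Or.inr fun heq => ?_)
    obtain ⟨u, hu⟩ := Option.isSome_iff_exists.mp (List.getLast?_isSome.mpr hxs)
    have hu' : ys.getLast? = some u := heq ▸ hu
    have humem : u ∈ xs := List.mem_of_getLast? hu
    have humem' : u ∈ ys := List.mem_of_getLast? hu'
    exact hys u humem' (hea ▸ List.mem_append_left _ humem)
  rw [solve_eq_of_split A B xs ys zs m (hsa.trans hea) (hsb.trans heb) hbr,
      alt_eq_of_split A B xs ys zs m (hsa.trans hea) (hsb.trans heb) hmxs hmys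
        (fun y hy => hea ▸ hys y hy)]
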